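-- pv_equiv track=rewrite | github.com/litkeys/AlgorithmLibrary | Algorithms Library/Utils/Math Functions.py | get_recur_len
-- ===== SOURCE A (Python) =====
-- def get_recur_len(dividend, divisor): #Returns the raw length of the recurring section of a division quotient
--     quotients = {0: 0}
--     recur_value = dividend
--     recur_len = 0
--
--     while recur_value not in quotients:
--         quotients[recur_value] = recur_len
--         recur_value = recur_value % divisor * 10
--         recur_len += 1
--
--     if not recur_value:
--         return 0
--
--     recur_len -= quotients[recur_value]
--
--     return recur_len
-- ===== SOURCE B (Python) =====
-- def get_recur_len(dividend, divisor): #Returns the raw length of the recurring section of a division quotient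
--     if dividend == 0:
--         return 0
--     # Floyd cycle detection on the remainder successor f(x) = x % divisor * 10,
--     # which is eventually periodic: no dictionary of seen values is needed.
--     slow = dividend % divisor * 10
--     fast = (dividend % divisor * 10) % divisor * 10
--     while slow != fast:
--         slow = slow % divisor * 10
--         fast = (fast % divisor * 10) % divisor * 10
--     if slow == 0:
--         return 0  # the quotient terminates: the only cycle reached is the fixed point 0
--     # walk once around the cycle to measure its length
--     length = 1
--     y = slow % divisor * 10
--     while y != slow:
--         y = y % divisor * 10
--         length += 1
--     return length
-- ===== Notes on version B (the rewrite author's own statement) =====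
-- stated objective: alternative
-- what changed: Replaces A's dictionary recording each remainder's position with Floyd's two-pointer cycle detection on f(x) = x % divisor * 10 (constant memory) followed by one walk around the cycle to count its length.
import Mathlib
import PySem

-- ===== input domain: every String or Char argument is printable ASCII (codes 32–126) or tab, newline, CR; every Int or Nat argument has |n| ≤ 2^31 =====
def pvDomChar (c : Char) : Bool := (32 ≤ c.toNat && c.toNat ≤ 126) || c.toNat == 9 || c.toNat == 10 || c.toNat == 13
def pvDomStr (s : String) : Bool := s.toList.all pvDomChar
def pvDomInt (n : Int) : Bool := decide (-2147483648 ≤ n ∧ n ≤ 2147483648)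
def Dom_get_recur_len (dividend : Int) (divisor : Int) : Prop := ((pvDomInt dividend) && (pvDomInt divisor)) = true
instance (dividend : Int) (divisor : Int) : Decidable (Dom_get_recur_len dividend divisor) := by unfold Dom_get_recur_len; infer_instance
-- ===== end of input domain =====

-- B replaces A's dictionary of seen remainders by Floyd cycle detection (constant memory): same return value, proved below.

-- ===== PORT A =====
-- the loop body's successor value: recur_value % divisor * 10
def pvF (d x : Int) : Int := PySem.Int.mod x d * 10

-- A's while loop; fuel only makes the recursion total (never exhausted on inputs satisfying Pre_)
def pvALoop (d : Int) : Nat → PySem.Dict Int Int → Int → Int → Int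
  | 0, _, _, _ => 0
  | fuel+1, q, x, len =>
    if q.contains x then
      -- loop exit: `if not recur_value: return 0` then `recur_len -= quotients[recur_value]`
      if x = 0 then 0 else len - (q.get? x).getD 0
    else
      pvALoop d fuel (q.insert x len) (pvF d x) (len + 1)

def get_recur_len (dividend : Int) (divisor : Int) : Int :=
  pvALoop divisor (divisor.natAbs + 2) (PySem.Dict.insert PySem.Dict.empty 0 0) dividend 0

-- ===== PORT B =====
-- Floyd meeting loop: slow advances one step, fast two, until they agree; returns the meeting value
def pvMeet (d : Int) : Nat → Int → Int → Int
  | 0, slow, _ => slow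
  | fuel+1, slow, fast =>
    if slow = fast then slow else pvMeet d fuel (pvF d slow) (pvF d (pvF d fast))

-- walk once around the cycle from the meeting value m, counting steps
def pvCycle (d m : Int) : Nat → Int → Int → Int
  | 0, _, len => len
  | fuel+1, y, len => if y = m then len else pvCycle d m fuel (pvF d y) (len + 1)

-- code after the meeting loop: a meeting value 0 means the decimal terminates
def pvTail (d m : Int) : Int :=
  if m = 0 then 0 else pvCycle d m (d.natAbs + 2) (pvF d m) 1

def get_recur_len_alt (dividend : Int) (divisor : Int) : Int :=
  if dividend = 0 then 0
  else pvTail divisor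
    (pvMeet divisor (divisor.natAbs + 2) (pvF divisor dividend) (pvF divisor (pvF divisor dividend)))

-- ===== PRECONDITION & SPEC =====
-- Pre_ excludes exactly the inputs where Python A raises ZeroDivisionError: divisor = 0 with a nonzero dividend.
def Pre_get_recur_len (dividend : Int) (divisor : Int) : Prop := divisor ≠ 0 ∨ dividend = 0
instance (dividend : Int) (divisor : Int) : Decidable (Pre_get_recur_len dividend divisor) := by unfold Pre_get_recur_len; infer_instance
def pvWitness_get_recur_len : Int × Int := (1, 7)

def Spec_get_recur_len (dividend : Int) (divisor : Int) (out : Int) : Prop := out = get_recur_len_alt dividend divisor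
instance (dividend : Int) (divisor : Int) (out : Int) : Decidable (Spec_get_recur_len dividend divisor out) := by unfold Spec_get_recur_len; infer_instance

-- ===== CLAIM (what is proved, stated in full; the proofs are below) =====
def Claim_equal_get_recur_len : Prop := ∀ (dividend : Int) (divisor : Int), Dom_get_recur_len dividend divisor → Pre_get_recur_len dividend divisor → Spec_get_recur_len dividend divisor (get_recur_len dividend divisor)

-- ===== LEMMAS AND PROOFS =====

-- the orbit x0, f x0, f (f x0), …
def pvS (d x0 : Int) : Nat → Int
  | 0 => x0
  | i+1 => pvF d (pvS d x0 i)

-- A's loop stops at index i iff the current value is 0 (seed key) or was seen before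
def pvStop (d x0 : Int) (i : Nat) : Prop :=
  pvS d x0 i = 0 ∨ ∃ j < i, pvS d x0 j = pvS d x0 i

-- the dictionary A has built after i iterations
def pvQ (d x0 : Int) : Nat → PySem.Dict Int Int
  | 0 => PySem.Dict.insert PySem.Dict.empty 0 0
  | i+1 => (pvQ d x0 i).insert (pvS d x0 i) i


-- basic facts about the successor function ------------------------------------

theorem pvF_zero (d : Int) : pvF d 0 = 0 := by
  unfold pvF
  rw [(PySem.Int.mod_eq_zero_iff_dvd 0 d).mpr (dvd_zero d)]
  ring

-- the finite set of possible orbit values after the first step ----------------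

noncomputable def pvRes (d : Int) : Finset Int := if 0 < d then Finset.Ico 0 d else Finset.Ioc d 0

noncomputable def pvVals (d : Int) : Finset Int := (pvRes d).image (· * 10)

theorem card_pvVals (d : Int) (hd : d ≠ 0) : (pvVals d).card = d.natAbs := by
  unfold pvVals pvRes
  rw [Finset.card_image_of_injective _ (mul_left_injective₀ (by norm_num : (10:Int) ≠ 0))]
  rcases lt_or_gt_of_ne hd with h | h
  · rw [if_neg (not_lt.mpr (le_of_lt h))]
    rw [Int.card_Ioc]
    omega
  · rw [if_pos h]
    rw [Int.card_Ico]
    omega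

theorem pvF_mem_vals (d x : Int) (hd : d ≠ 0) : pvF d x ∈ pvVals d := by
  unfold pvVals pvF
  apply Finset.mem_image_of_mem
  unfold pvRes
  rcases lt_or_gt_of_ne hd with h | h
  · rw [if_neg (not_lt.mpr (le_of_lt h))]
    have := PySem.Int.mod_neg_bounds x h
    rw [Finset.mem_Ioc]; omega
  · rw [if_pos h]
    have h1 := PySem.Int.mod_nonneg x h
    have h2 := PySem.Int.mod_lt x h
    rw [Finset.mem_Ico]; omega

theorem pvS_succ_mem (d x0 : Int) (hd : d ≠ 0) (i : Nat) :
    pvS d x0 (i + 1) ∈ pvVals d := pvF_mem_vals d _ hd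

-- a stop index exists within |d| + 1 steps (pigeonhole) ------------------------

theorem pvStop_exists (d x0 : Int) (hd : d ≠ 0) :
    ∃ i, i ≤ d.natAbs + 1 ∧ pvStop d x0 i := by
  by_contra hcon
  push_neg at hcon
  have hmaps : Set.MapsTo (fun i => pvS d x0 i) ↑(Finset.Icc 1 (d.natAbs + 1)) ↑(pvVals d) := by
    intro i hi
    simp only [Finset.coe_Icc, Set.mem_Icc] at hi
    obtain ⟨h1, _⟩ := hi
    obtain ⟨i', rfl⟩ := Nat.exists_eq_add_of_le h1
    rw [Nat.add_comm]
    exact pvS_succ_mem d x0 hd i'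
  have hcard : (pvVals d).card < (Finset.Icc 1 (d.natAbs + 1)).card := by
    rw [card_pvVals d hd, Nat.card_Icc]
    omega
  obtain ⟨a, ha, b, hb, hab, heq⟩ := Finset.exists_ne_map_eq_of_card_lt_of_maps_to hcard hmaps
  simp only [Finset.mem_Icc] at ha hb
  rcases Nat.lt_or_ge a b with h | h
  · exact hcon b hb.2 (Or.inr ⟨a, h, heq⟩)
  · have h' : b < a := by omega
    exact hcon a ha.2 (Or.inr ⟨b, h', heq.symm⟩)

-- distinctness of the prefix ---------------------------------------------------

theorem pv_nz (d x0 : Int) (n : Nat) (hmin : ∀ i < n, ¬ pvStop d x0 i)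
    {i : Nat} (hi : i < n) : pvS d x0 i ≠ 0 :=
  fun h => hmin i hi (Or.inl h)

theorem pv_inj (d x0 : Int) (n : Nat) (hmin : ∀ i < n, ¬ pvStop d x0 i)
    {j i : Nat} (hji : j < i) (hi : i < n) : pvS d x0 j ≠ pvS d x0 i :=
  fun h => hmin i hi (Or.inr ⟨j, hji, h⟩)

-- characterisation of the dictionary ------------------------------------------

theorem pvQ_get?_none (d x0 : Int) (i : Nat) (y : Int) (hy : y ≠ 0)
    (hnew : ∀ j < i, pvS d x0 j ≠ y) : (pvQ d x0 i).get? y = none := by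
  induction i with
  | zero =>
    unfold pvQ
    rw [PySem.Dict.get?_insert_of_ne _ _ hy]
    rfl
  | succ i ih =>
    unfold pvQ
    rw [PySem.Dict.get?_insert_of_ne _ _ (fun h => hnew i (Nat.lt_succ_self i) h.symm)]
    exact ih (fun j hj => hnew j (Nat.lt_succ_of_lt hj))

theorem pvQ_get?_zero (d x0 : Int) (i : Nat)
    (hnz : ∀ j < i, pvS d x0 j ≠ 0) : (pvQ d x0 i).get? 0 = some 0 := by
  induction i with
  | zero => unfold pvQ; rw [PySem.Dict.get?_insert_self]
  | succ i ih =>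
    unfold pvQ
    rw [PySem.Dict.get?_insert_of_ne _ _ (fun h => hnz i (Nat.lt_succ_self i) h.symm)]
    exact ih (fun j hj => hnz j (Nat.lt_succ_of_lt hj))

theorem pvQ_get?_first (d x0 : Int) (μ : Nat) :
    ∀ i, μ < i → (∀ j, μ < j → j < i → pvS d x0 j ≠ pvS d x0 μ) →
    (pvQ d x0 i).get? (pvS d x0 μ) = some (μ : Int) := by
  intro i
  induction i with
  | zero => omega
  | succ i ih =>
    intro hμi hdist
    rcases Nat.lt_or_ge μ i with h | h
    · unfold pvQ
      rw [PySem.Dict.get?_insert_of_ne _ _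
        (fun he => hdist i h (Nat.lt_succ_self i) he.symm)]
      exact ih h (fun j h1 h2 => hdist j h1 (Nat.lt_succ_of_lt h2))
    · have : μ = i := by omega
      subst this
      unfold pvQ
      rw [PySem.Dict.get?_insert_self]

theorem pv_contains_of_some (q : PySem.Dict Int Int) (x : Int) (v : Int)
    (h : q.get? x = some v) : q.contains x = true := by
  cases hq : q.contains x
  · rw [(PySem.Dict.get?_eq_none_iff_contains q x).mpr hq] at h
    cases h
  · rfl


-- unfolding lemma for A's loop -------------------------------------------------

theorem pvALoop_succ (d : Int) (fuel : Nat) (q : PySem.Dict Int Int) (x len : Int) :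
    pvALoop d (fuel + 1) q x len =
      if q.contains x then (if x = 0 then 0 else len - (q.get? x).getD 0)
      else pvALoop d fuel (q.insert x len) (pvF d x) (len + 1) := rfl

-- A's loop, terminating case Z: the orbit reaches 0 ----------------------------

theorem pvALoop_zero (d x0 : Int) (n : Nat)
    (hmin : ∀ i < n, ¬ pvStop d x0 i) (hz : pvS d x0 n = 0) :
    ∀ fuel i, i ≤ n → n - i < fuel →
      pvALoop d fuel (pvQ d x0 i) (pvS d x0 i) (i : Int) = 0 := by
  intro fuel
  induction fuel with
  | zero => omega
  | succ fuel ih =>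
    intro i hin hfuel
    rw [pvALoop_succ]
    rcases Nat.lt_or_ge i n with h | h
    · rw [if_neg]
      · have h1 : (pvQ d x0 i).insert (pvS d x0 i) (i : Int) = pvQ d x0 (i + 1) := rfl
        have h2 : pvF d (pvS d x0 i) = pvS d x0 (i + 1) := rfl
        have h3 : (i : Int) + 1 = ((i + 1 : Nat) : Int) := by push_cast; ring
        rw [h1, h2, h3]
        exact ih (i + 1) h (by omega)
      · have hnone : (pvQ d x0 i).get? (pvS d x0 i) = none :=
          pvQ_get?_none d x0 i _ (pv_nz d x0 n hmin h)
            (fun j hj => pv_inj d x0 n hmin hj h)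
        rw [(PySem.Dict.get?_eq_none_iff_contains _ _).mp hnone]
        exact Bool.false_ne_true
    · have hi : i = n := by omega
      subst hi
      rw [hz]
      have hsome : (pvQ d x0 i).get? 0 = some 0 :=
        pvQ_get?_zero d x0 i (fun j hj => pv_nz d x0 i hmin hj)
      rw [if_pos (pv_contains_of_some _ _ _ hsome), if_pos rfl]

-- A's loop, repeating case R ---------------------------------------------------

theorem pvALoop_rep (d x0 : Int) (n μ : Nat)
    (hmin : ∀ i < n, ¬ pvStop d x0 i) (hnz : pvS d x0 n ≠ 0)
    (hμn : μ < n) (hμ : pvS d x0 μ = pvS d x0 n) :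
    ∀ fuel i, i ≤ n → n - i < fuel →
      pvALoop d fuel (pvQ d x0 i) (pvS d x0 i) (i : Int) = (n : Int) - (μ : Int) := by
  intro fuel
  induction fuel with
  | zero => omega
  | succ fuel ih =>
    intro i hin hfuel
    rw [pvALoop_succ]
    rcases Nat.lt_or_ge i n with h | h
    · rw [if_neg]
      · have h1 : (pvQ d x0 i).insert (pvS d x0 i) (i : Int) = pvQ d x0 (i + 1) := rfl
        have h2 : pvF d (pvS d x0 i) = pvS d x0 (i + 1) := rfl
        have h3 : (i : Int) + 1 = ((i + 1 : Nat) : Int) := by push_cast; ring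
        rw [h1, h2, h3]
        exact ih (i + 1) h (by omega)
      · have hnone : (pvQ d x0 i).get? (pvS d x0 i) = none :=
          pvQ_get?_none d x0 i _ (pv_nz d x0 n hmin h)
            (fun j hj => pv_inj d x0 n hmin hj h)
        rw [(PySem.Dict.get?_eq_none_iff_contains _ _).mp hnone]
        exact Bool.false_ne_true
    · have hi : i = n := by omega
      subst hi
      have hsome : (pvQ d x0 i).get? (pvS d x0 i) = some (μ : Int) := by
        rw [← hμ]
        exact pvQ_get?_first d x0 μ i hμn
          (fun j h1 h2 => fun he => pv_inj d x0 i hmin h1 h2 he.symm)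
      rw [if_pos (pv_contains_of_some _ _ _ hsome), if_neg hnz, hsome]
      rfl

-- periodicity in case R --------------------------------------------------------

theorem pv_period (d x0 : Int) (n μ : Nat) (hμn : μ < n)
    (hμ : pvS d x0 μ = pvS d x0 n) :
    ∀ i, μ ≤ i → pvS d x0 (i + (n - μ)) = pvS d x0 i := by
  have key : ∀ k, pvS d x0 (μ + k + (n - μ)) = pvS d x0 (μ + k) := by
    intro k
    induction k with
    | zero =>
      have h1 : μ + 0 + (n - μ) = n := by omega
      rw [h1, Nat.add_zero, hμ]
    | succ k ih =>
      have h1 : μ + (k + 1) + (n - μ) = (μ + k + (n - μ)) + 1 := by omega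
      have h2 : μ + (k + 1) = (μ + k) + 1 := by omega
      rw [h1, h2]
      show pvF d (pvS d x0 (μ + k + (n - μ))) = pvF d (pvS d x0 (μ + k))
      rw [ih]
  intro i hi
  obtain ⟨k, rfl⟩ := Nat.exists_eq_add_of_le hi
  exact key k

theorem pv_period_mul (d x0 : Int) (n μ : Nat) (hμn : μ < n)
    (hμ : pvS d x0 μ = pvS d x0 n) :
    ∀ m i, μ ≤ i → pvS d x0 (i + (n - μ) * m) = pvS d x0 i := by
  intro m
  induction m with
  | zero => intro i _; rw [Nat.mul_zero, Nat.add_zero]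
  | succ m ih =>
    intro i hi
    have h1 : i + (n - μ) * (m + 1) = (i + (n - μ) * m) + (n - μ) := by ring
    rw [h1, pv_period d x0 n μ hμn hμ _ (by omega), ih i hi]

-- every orbit value equals a value of the prefix segment [μ, n) -----------------

theorem pv_reduce (d x0 : Int) (n μ : Nat) (hμn : μ < n)
    (hμ : pvS d x0 μ = pvS d x0 n) :
    ∀ i, ∃ i0, i0 < n ∧ pvS d x0 i = pvS d x0 i0 ∧ (μ ≤ i → μ ≤ i0) := by
  intro i
  induction i using Nat.strong_induction_on with
  | _ i ih =>
    rcases Nat.lt_or_ge i n with h | h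
    · exact ⟨i, h, rfl, fun h' => h'⟩
    · have hL : 1 ≤ n - μ := by omega
      have hge : μ ≤ i - (n - μ) := by omega
      have heq : pvS d x0 i = pvS d x0 (i - (n - μ)) := by
        have : (i - (n - μ)) + (n - μ) = i := by omega
        conv_lhs => rw [← this]
        exact pv_period d x0 n μ hμn hμ _ hge
      obtain ⟨i0, h1, h2, h3⟩ := ih (i - (n - μ)) (by omega)
      exact ⟨i0, h1, heq.trans h2, fun _ => h3 hge⟩

theorem pv_nz_all (d x0 : Int) (n μ : Nat)
    (hmin : ∀ i < n, ¬ pvStop d x0 i) (hμn : μ < n)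
    (hμ : pvS d x0 μ = pvS d x0 n) (i : Nat) : pvS d x0 i ≠ 0 := by
  obtain ⟨i0, h1, h2, _⟩ := pv_reduce d x0 n μ hμn hμ i
  rw [h2]
  exact pv_nz d x0 n hmin h1

-- in case Z the orbit is 0 from n on -------------------------------------------

theorem pv_zero_ge (d x0 : Int) (n : Nat) (hz : pvS d x0 n = 0) :
    ∀ i, n ≤ i → pvS d x0 i = 0 := by
  intro i hi
  obtain ⟨k, rfl⟩ := Nat.exists_eq_add_of_le hi
  induction k with
  | zero => exact hz
  | succ k ih =>
    have : n + (k + 1) = (n + k) + 1 := by omega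
    rw [this]
    show pvF d (pvS d x0 (n + k)) = 0
    rw [ih (by omega)]
    exact pvF_zero d

-- Floyd's meeting loop ---------------------------------------------------------

theorem pvMeet_eq (d x0 : Int) (ks : Nat) (hk1 : 1 ≤ ks)
    (hkm : pvS d x0 ks = pvS d x0 (2 * ks))
    (hkmin : ∀ k, 1 ≤ k → k < ks → pvS d x0 k ≠ pvS d x0 (2 * k)) :
    ∀ fuel k, 1 ≤ k → k ≤ ks → ks - k < fuel →
      pvMeet d fuel (pvS d x0 k) (pvS d x0 (2 * k)) = pvS d x0 ks := by
  intro fuel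
  induction fuel with
  | zero => omega
  | succ fuel ih =>
    intro k h1 h2 h3
    show (if pvS d x0 k = pvS d x0 (2 * k) then pvS d x0 k
      else pvMeet d fuel (pvF d (pvS d x0 k)) (pvF d (pvF d (pvS d x0 (2 * k))))) = _
    by_cases he : pvS d x0 k = pvS d x0 (2 * k)
    · rw [if_pos he]
      have hk : k = ks := by
        by_contra hne
        exact hkmin k h1 (by omega) he
      rw [hk] at he ⊢
    · rw [if_neg he]
      have hk : k < ks := by
        rcases Nat.eq_or_lt_of_le h2 with h | h
        · subst h; exact absurd hkm he
        · exact h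
      have e1 : pvF d (pvS d x0 k) = pvS d x0 (k + 1) := rfl
      have e2 : pvF d (pvF d (pvS d x0 (2 * k))) = pvS d x0 (2 * (k + 1)) := by
        have h5 : 2 * (k + 1) = (2 * k + 1) + 1 := by omega
        rw [h5]; rfl
      rw [e2, e1]
      exact ih (k + 1) (by omega) hk (by omega)

-- the cycle-measuring loop -----------------------------------------------------

theorem pvCycle_eq (d x0 : Int) (i0 L : Nat) (hL : 1 ≤ L)
    (hhit : pvS d x0 (i0 + L) = pvS d x0 i0)
    (hminp : ∀ p, 1 ≤ p → p < L → pvS d x0 (i0 + p) ≠ pvS d x0 i0) :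
    ∀ fuel j len, 1 ≤ j → j ≤ L → L - j < fuel →
      pvCycle d (pvS d x0 i0) fuel (pvS d x0 (i0 + j)) len = len + ((L : Int) - (j : Int)) := by
  intro fuel
  induction fuel with
  | zero => omega
  | succ fuel ih =>
    intro j len h1 h2 h3
    show (if pvS d x0 (i0 + j) = pvS d x0 i0 then len
      else pvCycle d (pvS d x0 i0) fuel (pvF d (pvS d x0 (i0 + j))) (len + 1)) = _
    rcases Nat.lt_or_ge j L with h | h
    · rw [if_neg (hminp j h1 h)]
      have h4 : pvF d (pvS d x0 (i0 + j)) = pvS d x0 (i0 + (j + 1)) := by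
        have : i0 + (j + 1) = (i0 + j) + 1 := by omega
        rw [this]; rfl
      rw [h4, ih (j + 1) (len + 1) (by omega) h (by omega)]
      push_cast; ring
    · have hj : j = L := by omega
      subst hj
      rw [if_pos hhit]
      omega


-- classification of the first Floyd meeting point ------------------------------

theorem pv_meetZ (d x0 : Int) (n : Nat) (hmin : ∀ i < n, ¬ pvStop d x0 i)
    (hz : pvS d x0 n = 0) (ks : Nat) (hk1 : 1 ≤ ks)
    (hkm : pvS d x0 ks = pvS d x0 (2 * ks)) (hksn : ks ≤ n) :
    pvS d x0 ks = 0 := by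
  rcases Nat.eq_or_lt_of_le hksn with h | h
  · rw [h, hz]
  · rcases Nat.lt_or_ge (2 * ks) n with h2 | h2
    · exact absurd hkm (pv_inj d x0 n hmin (by omega) h2)
    · rw [hkm]
      exact pv_zero_ge d x0 n hz _ h2

theorem pv_meetR_ge (d x0 : Int) (n μ : Nat) (hmin : ∀ i < n, ¬ pvStop d x0 i)
    (hμn : μ < n) (hμ : pvS d x0 μ = pvS d x0 n) (ks : Nat) (hk1 : 1 ≤ ks)
    (hkm : pvS d x0 ks = pvS d x0 (2 * ks)) (hksn : ks ≤ n) : μ ≤ ks := by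
  by_contra hlt
  push_neg at hlt
  rcases Nat.lt_or_ge (2 * ks) n with h2 | h2
  · exact pv_inj d x0 n hmin (by omega) h2 hkm
  · obtain ⟨i1, hi1n, he1, hge1⟩ := pv_reduce d x0 n μ hμn hμ (2 * ks)
    have hμi1 : μ ≤ i1 := hge1 (by omega)
    exact pv_inj d x0 n hmin (by omega : ks < i1) hi1n (hkm.trans he1)

-- minimality of the cycle length ------------------------------------------------

theorem pv_cycle_min (d x0 : Int) (n μ : Nat) (hmin : ∀ i < n, ¬ pvStop d x0 i)
    (hμn : μ < n) (hμ : pvS d x0 μ = pvS d x0 n) (i0 : Nat)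
    (hi0μ : μ ≤ i0) (hi0n : i0 < n) :
    ∀ p, 1 ≤ p → p < n - μ → pvS d x0 (i0 + p) ≠ pvS d x0 i0 := by
  intro p h1 h2 he
  rcases Nat.lt_or_ge (i0 + p) n with h | h
  · exact pv_inj d x0 n hmin (by omega) h he.symm
  · have hge : μ ≤ i0 + p - (n - μ) := by omega
    have heq : pvS d x0 (i0 + p) = pvS d x0 (i0 + p - (n - μ)) := by
      have h5 : (i0 + p - (n - μ)) + (n - μ) = i0 + p := by omega
      conv_lhs => rw [← h5]
      exact pv_period d x0 n μ hμn hμ _ hge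
    exact pv_inj d x0 n hmin (by omega : i0 + p - (n - μ) < i0) hi0n (heq.symm.trans he)

-- a Floyd meeting point ≤ n exists in the repeating case -------------------------

theorem pv_meetR_exists (d x0 : Int) (n μ : Nat) (hμn : μ < n)
    (hμ : pvS d x0 μ = pvS d x0 n) :
    ∃ k, (1 ≤ k ∧ pvS d x0 k = pvS d x0 (2 * k)) ∧ k ≤ n := by
  have hdm := Nat.div_add_mod μ (n - μ)
  have hml := Nat.mod_lt μ (show 0 < n - μ by omega)
  have h6 : (n - μ) * (μ / (n - μ) + 1) = (n - μ) * (μ / (n - μ)) + (n - μ) := by ring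
  refine ⟨(n - μ) * (μ / (n - μ) + 1), ⟨by omega, ?_⟩, by omega⟩
  have hge : μ ≤ (n - μ) * (μ / (n - μ) + 1) := by omega
  have h2 : 2 * ((n - μ) * (μ / (n - μ) + 1)) =
      (n - μ) * (μ / (n - μ) + 1) + (n - μ) * (μ / (n - μ) + 1) := by ring
  rw [h2]
  exact (pv_period_mul d x0 n μ hμn hμ _ _ hge).symm

-- ===== VERDICT (by name: the statement is the Claim_ definition above) =====
theorem get_recur_len_spec : Claim_equal_get_recur_len := by
  intro dividend divisor _ hpre
  unfold Spec_get_recur_len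
  by_cases hx0 : dividend = 0
  · subst hx0
    unfold get_recur_len get_recur_len_alt
    rw [if_pos rfl]
    show pvALoop divisor (divisor.natAbs + 1 + 1) (PySem.Dict.insert PySem.Dict.empty 0 0) 0 0 = 0
    rw [pvALoop_succ]
    have hsome : (PySem.Dict.insert (PySem.Dict.empty : PySem.Dict Int Int) 0 0).get? 0 = some 0 :=
      PySem.Dict.get?_insert_self _ 0 0
    rw [if_pos (pv_contains_of_some _ _ _ hsome), if_pos rfl]
  · have hd : divisor ≠ 0 := by
      rcases hpre with h | h
      · exact h
      · exact absurd h hx0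
    haveI : DecidablePred (pvStop divisor dividend) := fun i => by
      unfold pvStop; infer_instance
    obtain ⟨nb, hnb, hstopb⟩ := pvStop_exists divisor dividend hd
    have hex : ∃ i, pvStop divisor dividend i := ⟨nb, hstopb⟩
    have hstop : pvStop divisor dividend (Nat.find hex) := Nat.find_spec hex
    have hmin : ∀ i < Nat.find hex, ¬ pvStop divisor dividend i :=
      fun i hi => Nat.find_min hex hi
    have hn_le : Nat.find hex ≤ divisor.natAbs + 1 := le_trans (Nat.find_min' hex hstopb) hnb
    set n := Nat.find hex with hndef
    have hn1 : 1 ≤ n := by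
      rcases Nat.eq_zero_or_pos n with h0 | h
      · exfalso
        rw [h0] at hstop
        rcases hstop with h | ⟨j, hj, _⟩
        · exact hx0 h
        · omega
      · exact h
    have hmeet_n : ∃ k, (1 ≤ k ∧ pvS divisor dividend k = pvS divisor dividend (2 * k)) ∧ k ≤ n := by
      by_cases hz : pvS divisor dividend n = 0
      · exact ⟨n, ⟨hn1, by rw [hz, pv_zero_ge divisor dividend n hz (2 * n) (by omega)]⟩, le_refl n⟩
      · rcases hstop with h | ⟨μ, hμn, hμ⟩
        · exact absurd h hz
        · exact pv_meetR_exists divisor dividend n μ hμn hμ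
    obtain ⟨kb, hkbP, hkbn⟩ := hmeet_n
    have hPex : ∃ k, 1 ≤ k ∧ pvS divisor dividend k = pvS divisor dividend (2 * k) := ⟨kb, hkbP⟩
    have hksP : 1 ≤ Nat.find hPex ∧
        pvS divisor dividend (Nat.find hPex) = pvS divisor dividend (2 * Nat.find hPex) :=
      Nat.find_spec hPex
    have hksmin : ∀ k, 1 ≤ k → k < Nat.find hPex →
        pvS divisor dividend k ≠ pvS divisor dividend (2 * k) :=
      fun k h1 hk he => Nat.find_min hPex hk ⟨h1, he⟩
    have hksn : Nat.find hPex ≤ n := le_trans (Nat.find_min' hPex hkbP) hkbn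
    set ks := Nat.find hPex with hksdef
    have hm : pvMeet divisor (divisor.natAbs + 2) (pvF divisor dividend)
        (pvF divisor (pvF divisor dividend)) = pvS divisor dividend ks := by
      have e1 : pvF divisor dividend = pvS divisor dividend 1 := rfl
      have e2 : pvF divisor (pvF divisor dividend) = pvS divisor dividend (2 * 1) := rfl
      rw [e2, e1]
      exact pvMeet_eq divisor dividend ks hksP.1 hksP.2 hksmin _ 1 (le_refl 1) hksP.1 (by omega)
    unfold get_recur_len get_recur_len_alt
    rw [if_neg hx0, hm]
    by_cases hz : pvS divisor dividend n = 0
    · have hA : pvALoop divisor (divisor.natAbs + 2)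
          (PySem.Dict.insert PySem.Dict.empty 0 0) dividend 0 = 0 :=
        pvALoop_zero divisor dividend n hmin hz _ 0 (by omega) (by omega)
      have hmz : pvS divisor dividend ks = 0 :=
        pv_meetZ divisor dividend n hmin hz ks hksP.1 hksP.2 hksn
      rw [hmz]
      unfold pvTail
      rw [if_pos rfl]
      exact hA
    · rcases hstop with h | ⟨μ, hμn, hμ⟩
      · exact absurd h hz
      · have hA : pvALoop divisor (divisor.natAbs + 2)
            (PySem.Dict.insert PySem.Dict.empty 0 0) dividend 0 = (n : Int) - (μ : Int) :=
          pvALoop_rep divisor dividend n μ hmin hz hμn hμ _ 0 (by omega) (by omega)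
        have hmnz : pvS divisor dividend ks ≠ 0 :=
          pv_nz_all divisor dividend n μ hmin hμn hμ ks
        have hksμ : μ ≤ ks :=
          pv_meetR_ge divisor dividend n μ hmin hμn hμ ks hksP.1 hksP.2 hksn
        obtain ⟨i0, hi0n, hi0e, hi0ge⟩ := pv_reduce divisor dividend n μ hμn hμ ks
        have hi0μ : μ ≤ i0 := hi0ge hksμ
        unfold pvTail
        rw [if_neg hmnz, hi0e]
        have hB : pvCycle divisor (pvS divisor dividend i0) (divisor.natAbs + 2)
            (pvF divisor (pvS divisor dividend i0)) 1 = 1 + (((n - μ : Nat) : Int) - ((1 : Nat) : Int)) :=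
          pvCycle_eq divisor dividend i0 (n - μ) (by omega)
            (pv_period divisor dividend n μ hμn hμ i0 hi0μ)
            (pv_cycle_min divisor dividend n μ hmin hμn hμ i0 hi0μ hi0n)
            _ 1 1 (le_refl 1) (by omega) (by omega)
        rw [hA, hB]
        omega
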